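-- pv_equiv track=rewrite | github.com/blocklistproject/Lists | src/merge.py | collapse_subdomains
-- ===== SOURCE A (Python) =====
-- def collapse_subdomains(domains: set[str], threshold: int = 10) -> set[str]:
--     """Collapse excessive subdomains to parent domain.
--
--     If a domain has more than `threshold` subdomains blocked,
--     consider blocking the parent domain instead.
--
--     This is an OPTIONAL optimization - use with care as it may
--     cause false positives.
--
--     Args:
--         domains: Set of domains
--         threshold: Minimum subdomains before collapsing
--
--     Returns:
--         Domain set with some subdomains collapsed to parents
--     """
--     # Get unique second-level domains (rough approximation)
--     parent_counts: dict[str, int] = {}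
--
--     for domain in domains:
--         parts = domain.split('.')
--         if len(parts) >= 2:
--             # Get last two parts as parent approximation
--             parent = '.'.join(parts[-2:])
--             parent_counts[parent] = parent_counts.get(parent, 0) + 1
--
--     # Find parents exceeding threshold
--     hot_parents = {p for p, c in parent_counts.items() if c >= threshold}
--
--     # Remove subdomains and keep hot parents
--     result = set()
--     for domain in domains:
--         parts = domain.split('.')
--         if len(parts) >= 2:
--             parent = '.'.join(parts[-2:])
--             if parent in hot_parents:
--                 result.add(parent)
--             else:
--                 result.add(domain)
--         else:
--             result.add(domain)
--
--     return result
-- ===== SOURCE B (Python) =====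
-- def collapse_subdomains(domains: set[str], threshold: int = 10) -> set[str]:
--     """Collapse excessive subdomains to parent domain.
--
--     Dictionary-free variant: instead of building a parent counter and a
--     hot-parents set, decide each domain on the spot by scanning the input
--     once per domain to count its parent's occurrences (nested scan).
--     """
--     result = set()
--     for domain in domains:
--         parts = domain.split('.')
--         if len(parts) < 2:
--             result.add(domain)
--         else:
--             parent = '.'.join(parts[-2:])
--             siblings = 0
--             for other in domains:
--                 op = other.split('.')
--                 if len(op) >= 2 and '.'.join(op[-2:]) == parent:
--                     siblings += 1
--             result.add(parent if siblings >= threshold else domain)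
--     return result
-- ===== Notes on version B (the rewrite author's own statement) =====
-- stated objective: alternative
-- what changed: A builds a parent-count dictionary in a first pass and a hot-parents set before a second decision pass; B uses no dictionary or hot set at all: for each domain it counts that domain's parent directly with an inner scan of the input and decides against the threshold on the spot.
import Mathlib
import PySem

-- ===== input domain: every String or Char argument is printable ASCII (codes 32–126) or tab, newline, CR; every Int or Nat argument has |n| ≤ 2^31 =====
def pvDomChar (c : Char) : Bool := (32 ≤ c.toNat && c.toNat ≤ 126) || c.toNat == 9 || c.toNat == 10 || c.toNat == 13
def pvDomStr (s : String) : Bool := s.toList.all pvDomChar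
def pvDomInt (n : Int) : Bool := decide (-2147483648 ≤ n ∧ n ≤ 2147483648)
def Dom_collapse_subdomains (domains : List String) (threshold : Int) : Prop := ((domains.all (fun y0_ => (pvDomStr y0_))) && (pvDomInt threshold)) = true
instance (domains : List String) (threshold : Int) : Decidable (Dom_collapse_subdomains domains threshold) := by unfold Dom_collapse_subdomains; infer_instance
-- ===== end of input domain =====

-- B drops A's parent-count dictionary and hot-parents set: each domain's parent is counted by a
-- direct inner scan of the input and decided against the threshold on the spot (alternative, not faster).


-- ===== PORT A =====
-- sep "." is nonempty, so PySem.Str.split? never returns none; `.getD []` only discharges the Option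
def collapse_subdomains (domains : List String) (threshold : Int) : List String :=
  let parent_counts : PySem.Dict String Int :=
    domains.foldl (fun pc domain =>
      let parts := (PySem.Str.split? domain ".").getD []
      if 2 ≤ parts.length then
        let parent := PySem.Str.join "." (PySem.List.slice parts (some (-2)) none)
        pc.insert parent (pc.getD parent 0 + 1)
      else pc) PySem.Dict.empty
  let hot_parents : PySem.Set String :=
    PySem.Set.ofList ((parent_counts.items.filter (fun pc => decide (threshold ≤ pc.2))).map (·.1))
  domains.foldl (fun result domain =>
      let parts := (PySem.Str.split? domain ".").getD []
      if 2 ≤ parts.length then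
        let parent := PySem.Str.join "." (PySem.List.slice parts (some (-2)) none)
        if hot_parents.contains parent then PySem.Set.add result parent
        else PySem.Set.add result domain
      else PySem.Set.add result domain) PySem.Set.empty

-- ===== PORT B =====
def collapse_subdomains_alt (domains : List String) (threshold : Int) : List String :=
  domains.foldl (fun result domain =>
      let parts := (PySem.Str.split? domain ".").getD []
      if parts.length < 2 then PySem.Set.add result domain
      else
        let parent := PySem.Str.join "." (PySem.List.slice parts (some (-2)) none)
        let siblings : Int :=
          domains.foldl (fun s other =>
            let op := (PySem.Str.split? other ".").getD []
            if 2 ≤ op.length ∧ PySem.Str.join "." (PySem.List.slice op (some (-2)) none) = parent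
            then s + 1 else s) 0
        PySem.Set.add result (if threshold ≤ siblings then parent else domain)) PySem.Set.empty

-- ===== PRECONDITION & SPEC =====
def Spec_collapse_subdomains (domains : List String) (threshold : Int) (out : List String) : Prop := out = collapse_subdomains_alt domains threshold
instance (domains : List String) (threshold : Int) (out : List String) : Decidable (Spec_collapse_subdomains domains threshold out) := by unfold Spec_collapse_subdomains; infer_instance

-- ===== CLAIM =====
def Claim_equal_collapse_subdomains : Prop := ∀ (domains : List String) (threshold : Int), Dom_collapse_subdomains domains threshold → Spec_collapse_subdomains domains threshold (collapse_subdomains domains threshold)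

-- ===== LEMMAS AND PROOFS =====

-- proof-side abbreviation: the optional parent of a domain
def pvParent (domain : String) : Option String :=
  let parts := (PySem.Str.split? domain ".").getD []
  if 2 ≤ parts.length then some (PySem.Str.join "." (PySem.List.slice parts (some (-2)) none))
  else none

-- A's counting loop is the plain counting fold over the parents list (domains.filterMap pvParent)
theorem pv_countA_eq (l : List String) (init : PySem.Dict String Int) :
    l.foldl (fun pc domain =>
      let parts := (PySem.Str.split? domain ".").getD []
      if 2 ≤ parts.length then
        let parent := PySem.Str.join "." (PySem.List.slice parts (some (-2)) none)
        pc.insert parent (pc.getD parent 0 + 1)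
      else pc) init
    = (l.filterMap pvParent).foldl (fun d x => d.insert x (d.getD x 0 + 1)) init := by
  induction l generalizing init with
  | nil => rfl
  | cons hd tl ih =>
    simp only [List.foldl_cons, List.filterMap_cons]
    by_cases h : 2 ≤ ((PySem.Str.split? hd ".").getD []).length
    · have hpv : pvParent hd = some (PySem.Str.join "." (PySem.List.slice ((PySem.Str.split? hd ".").getD []) (some (-2)) none)) := by
        simp [pvParent, h]
      rw [hpv]
      simp only [List.foldl_cons]
      rw [if_pos h]
      exact ih _
    · have hpv : pvParent hd = none := by simp [pvParent, h]
      rw [hpv]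
      rw [if_neg h]
      exact ih _

-- B's inner sibling scan is the count of p in the parents list
theorem pv_siblings_eq (l : List String) (p : String) (s0 : Int) :
    l.foldl (fun s other =>
      let op := (PySem.Str.split? other ".").getD []
      if 2 ≤ op.length ∧ PySem.Str.join "." (PySem.List.slice op (some (-2)) none) = p
      then s + 1 else s) s0
    = s0 + ((l.filterMap pvParent).count p : Int) := by
  induction l generalizing s0 with
  | nil => simp
  | cons hd tl ih =>
    simp only [List.foldl_cons, List.filterMap_cons]
    by_cases h : 2 ≤ ((PySem.Str.split? hd ".").getD []).length
    · have hpv : pvParent hd = some (PySem.Str.join "." (PySem.List.slice ((PySem.Str.split? hd ".").getD []) (some (-2)) none)) := by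
        simp [pvParent, h]
      rw [hpv]
      by_cases he : PySem.Str.join "." (PySem.List.slice ((PySem.Str.split? hd ".").getD []) (some (-2)) none) = p
      · rw [if_pos ⟨h, he⟩, ih, he, List.count_cons_self]
        push_cast; ring
      · rw [if_neg (by exact fun hc => he hc.2), ih, List.count_cons_of_ne (by simpa using he)]
    · have hpv : pvParent hd = none := by simp [pvParent, h]
      rw [hpv, if_neg (by exact fun hc => h hc.1), ih]

-- membership in A's hot_parents set, for a parent that occurs in the parents list
theorem pv_mem_hot (parents : List String) (threshold : Int) (p : String) (hp : p ∈ parents) :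
    (PySem.Set.ofList
      (((PySem.Dict.counter parents).items.filter (fun pc => decide (threshold ≤ pc.2))).map
        (·.1))).contains p = decide (threshold ≤ (parents.count p : Int)) := by
  by_cases h : threshold ≤ (parents.count p : Int)
  · simp only [h, decide_true]
    have : p ∈ (((PySem.Dict.counter parents).items.filter (fun pc => decide (threshold ≤ pc.2))).map
        (fun pc => pc.1)) := by
      simp only [PySem.Dict.items_counter, List.mem_map, List.mem_filter]
      exact ⟨(p, (parents.count p : Int)), ⟨by simpa [PySem.Set.mem_ofList] using hp, by simpa using h⟩, rfl⟩
    simpa [PySem.Set.contains, PySem.Set.mem_ofList] using this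
  · simp only [h, decide_false]
    suffices hns : p ∉ (((PySem.Dict.counter parents).items.filter (fun pc => decide (threshold ≤ pc.2))).map
        (fun pc => pc.1)) by
      simpa [PySem.Set.contains, PySem.Set.mem_ofList] using hns
    intro hm
    rcases List.mem_map.mp hm with ⟨⟨q, c⟩, hqc, hq⟩
    rcases List.mem_filter.mp hqc with ⟨hmem, hc⟩
    rw [PySem.Dict.items_counter] at hmem
    rcases List.mem_map.mp hmem with ⟨k, _, hk⟩
    cases hq
    cases hk
    exact h (by simpa using hc)

-- ===== VERDICT =====
theorem collapse_subdomains_spec : Claim_equal_collapse_subdomains := by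
  intro domains threshold _
  show collapse_subdomains domains threshold = collapse_subdomains_alt domains threshold
  unfold collapse_subdomains collapse_subdomains_alt
  rw [pv_countA_eq, PySem.Dict.foldl_insert_getD_add_one_eq_counter]
  apply PySem.List.foldl_congr_mem
  intro acc x hx
  by_cases h2 : 2 ≤ ((PySem.Str.split? x ".").getD []).length
  · have hlt : ¬ ((PySem.Str.split? x ".").getD []).length < 2 := by omega
    have hpv : pvParent x = some (PySem.Str.join "." (PySem.List.slice ((PySem.Str.split? x ".").getD []) (some (-2)) none)) := by
      simp [pvParent, h2]
    have hp : (PySem.Str.join "." (PySem.List.slice ((PySem.Str.split? x ".").getD []) (some (-2)) none)) ∈ domains.filterMap pvParent :=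
      List.mem_filterMap.mpr ⟨x, hx, hpv⟩
    rw [if_pos h2, if_neg hlt]
    simp only []
    rw [pv_mem_hot _ threshold _ hp, pv_siblings_eq]
    simp only [zero_add]
    by_cases hth : threshold ≤ ((domains.filterMap pvParent).count (PySem.Str.join "." (PySem.List.slice ((PySem.Str.split? x ".").getD []) (some (-2)) none)) : Int)
    · simp [hth]
    · simp [hth]
  · have hlt : ((PySem.Str.split? x ".").getD []).length < 2 := by omega
    rw [if_neg h2, if_pos hlt]
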